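-- pv_equiv track=rewrite | github.com/anix-lynch/mocktailverse | lambda/transform.py | identify_spirit_type
-- ===== SOURCE A (Python) =====
-- from typing import Dict, List, Any
--
-- def identify_spirit_type(ingredients: List[Dict[str, Any]]) -> str:
--     """
--     Identify the primary spirit type in the cocktail.
--
--     Args:
--         ingredients: List of ingredients
--
--     Returns:
--         Primary spirit type or 'non-alcoholic'
--     """
--     spirit_map = {
--         'vodka': ['vodka', 'absolut', 'smirnoff'],
--         'gin': ['gin', 'hendrick', 'tanqueray'],
--         'rum': ['rum', 'bacardi', 'havana club'],
--         'tequila': ['tequila', 'patron', 'reposado'],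
--         'whiskey': ['whiskey', 'bourbon', 'scotch', 'rye'],
--         'brandy': ['brandy', 'cognac', 'armagnac']
--     }
--
--     for spirit, keywords in spirit_map.items():
--         for ingredient in ingredients:
--             name = ingredient.get('name', '').lower()
--             if any(keyword in name for keyword in keywords):
--                 return spirit
--
--     return 'non-alcoholic'
-- ===== SOURCE B (Python) =====
-- def identify_spirit_type(ingredients):
--     """Identify the primary spirit type in the cocktail (one pass over ingredients,
--     then pick the highest-priority matched spirit)."""
--     spirit_map = {
--         'vodka': ['vodka', 'absolut', 'smirnoff'],
--         'gin': ['gin', 'hendrick', 'tanqueray'],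
--         'rum': ['rum', 'bacardi', 'havana club'],
--         'tequila': ['tequila', 'patron', 'reposado'],
--         'whiskey': ['whiskey', 'bourbon', 'scotch', 'rye'],
--         'brandy': ['brandy', 'cognac', 'armagnac']
--     }
--     matched = set()
--     for ingredient in ingredients:
--         name = ingredient.get('name', '').lower()
--         for spirit, keywords in spirit_map.items():
--             if any(keyword in name for keyword in keywords):
--                 matched.add(spirit)
--     return next((spirit for spirit in spirit_map if spirit in matched), 'non-alcoholic')
-- ===== Notes on version B (the rewrite author's own statement) =====
-- stated objective: alternative
-- what changed: B inverts the scan: one pass over the ingredients collects the set of spirits each name triggers, then the first spirit (in spirit_map priority order) found in that set is returned, instead of A's re-scan of the whole ingredient list once per spirit.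
import Mathlib
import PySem

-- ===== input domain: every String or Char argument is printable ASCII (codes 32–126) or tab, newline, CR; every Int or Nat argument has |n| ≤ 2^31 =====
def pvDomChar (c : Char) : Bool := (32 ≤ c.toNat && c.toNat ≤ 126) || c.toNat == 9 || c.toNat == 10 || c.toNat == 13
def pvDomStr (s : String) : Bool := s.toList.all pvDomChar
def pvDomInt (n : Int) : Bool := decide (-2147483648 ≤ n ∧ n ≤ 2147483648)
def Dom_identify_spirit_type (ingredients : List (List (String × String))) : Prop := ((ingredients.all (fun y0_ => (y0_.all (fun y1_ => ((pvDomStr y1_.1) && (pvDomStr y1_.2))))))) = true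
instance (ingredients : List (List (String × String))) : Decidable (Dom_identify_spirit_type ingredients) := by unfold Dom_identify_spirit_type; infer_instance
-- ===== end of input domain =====

-- B inverts A's scan: one pass over the ingredients collects the set of matched spirits,
-- then the first spirit in spirit_map priority order found in that set is returned (objective: alternative).

-- the literal spirit_map, shared constant of both sources
def pvSpiritMap : List (String × List String) :=
  [("vodka", ["vodka", "absolut", "smirnoff"]),
   ("gin", ["gin", "hendrick", "tanqueray"]),
   ("rum", ["rum", "bacardi", "havana club"]),
   ("tequila", ["tequila", "patron", "reposado"]),
   ("whiskey", ["whiskey", "bourbon", "scotch", "rye"]),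
   ("brandy", ["brandy", "cognac", "armagnac"])]

-- any(keyword in name for keyword in keywords), with name = ingredient.get('name','').lower()
def pvMatch (keywords : List String) (ingredient : List (String × String)) : Bool :=
  keywords.any (fun kw => PySem.Str.isIn kw (PySem.Str.lower ((PySem.Dict.mk ingredient).getD "name" "")))

-- ===== PORT A =====
-- inner 'for ingredient in ingredients: … return spirit' loop (early exit)
def pvAScan (keywords : List String) : List (List (String × String)) → Bool
  | [] => false
  | ing :: rest => if pvMatch keywords ing then true else pvAScan keywords rest

-- outer 'for spirit, keywords in spirit_map.items()' loop
def pvALoop : List (String × List String) → List (List (String × String)) → String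
  | [], _ => "non-alcoholic"
  | p :: rest, ings => if pvAScan p.2 ings then p.1 else pvALoop rest ings

def identify_spirit_type (ingredients : List (List (String × String))) : String :=
  pvALoop pvSpiritMap ingredients

-- ===== PORT B =====
-- matched = {spirit triggered by some ingredient}, built in one pass over the ingredients
def pvCollect (ingredients : List (List (String × String))) : PySem.Set String :=
  ingredients.foldl
    (fun acc ing =>
      pvSpiritMap.foldl (fun a p => if pvMatch p.2 ing then PySem.Set.add a p.1 else a) acc)
    PySem.Set.empty

def identify_spirit_type_alt (ingredients : List (List (String × String))) : String :=
  let matched := pvCollect ingredients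
  match pvSpiritMap.find? (fun p => PySem.Set.contains matched p.1) with
  | some p => p.1
  | none => "non-alcoholic"

-- ===== PRECONDITION & SPEC =====
def Spec_identify_spirit_type (ingredients : List (List (String × String))) (out : String) : Prop := out = identify_spirit_type_alt ingredients
instance (ingredients : List (List (String × String))) (out : String) : Decidable (Spec_identify_spirit_type ingredients out) := by unfold Spec_identify_spirit_type; infer_instance

-- ===== CLAIM (what is proved, stated in full; the proofs are below) =====
def Claim_equal_identify_spirit_type : Prop := ∀ (ingredients : List (List (String × String))), Dom_identify_spirit_type ingredients → Spec_identify_spirit_type ingredients (identify_spirit_type ingredients)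

-- ===== LEMMAS AND PROOFS =====

-- A's inner ingredient loop is 'any'
theorem pvAScan_eq_any (kws : List String) (ings : List (List (String × String))) :
    pvAScan kws ings = ings.any (fun ing => pvMatch kws ing) := by
  induction ings with
  | nil => rfl
  | cons ing rest ih =>
    simp only [pvAScan, List.any_cons, ih]
    by_cases h : pvMatch kws ing = true <;> simp [h]

-- membership after the inner spirit_map fold for one ingredient
theorem mem_inner_fold (ing : List (String × String)) (s : String) :
    ∀ (l : List (String × List String)) (acc : PySem.Set String),
      (s ∈ l.foldl (fun a p => if pvMatch p.2 ing then PySem.Set.add a p.1 else a) acc ↔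
        s ∈ acc ∨ ∃ p ∈ l, p.1 = s ∧ pvMatch p.2 ing = true) := by
  intro l
  induction l with
  | nil => intro acc; simp
  | cons p rest ih =>
    intro acc
    simp only [List.foldl_cons, ih, List.exists_mem_cons_iff]
    have hcomm : (s = p.1) ↔ (p.1 = s) := eq_comm
    by_cases h : pvMatch p.2 ing = true
    · simp only [h, if_true, PySem.Set.mem_add]
      tauto
    · simp only [h]
      tauto

-- membership in the collected set
theorem mem_collect (ings : List (List (String × String))) (s : String) :
    ∀ acc : PySem.Set String,
      (s ∈ ings.foldl
          (fun acc ing =>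
            pvSpiritMap.foldl (fun a p => if pvMatch p.2 ing then PySem.Set.add a p.1 else a) acc)
          acc ↔
        s ∈ acc ∨ ∃ ing ∈ ings, ∃ p ∈ pvSpiritMap, p.1 = s ∧ pvMatch p.2 ing = true) := by
  induction ings with
  | nil => intro acc; simp
  | cons ing rest ih =>
    intro acc
    simp only [List.foldl_cons, ih, mem_inner_fold, List.exists_mem_cons_iff]
    exact or_assoc

-- keys of pvSpiritMap determine their keyword lists
theorem spiritMap_keys_inj :
    ∀ p ∈ pvSpiritMap, ∀ q ∈ pvSpiritMap, p.1 = q.1 → p.2 = q.2 := by decide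

-- for a spirit_map entry, set membership equals "some ingredient matches it"
theorem contains_collect (ings : List (List (String × String)))
    (p : String × List String) (hp : p ∈ pvSpiritMap) :
    PySem.Set.contains (pvCollect ings) p.1 = ings.any (fun ing => pvMatch p.2 ing) := by
  rcases h : ings.any (fun ing => pvMatch p.2 ing) with _ | _
  · rw [Bool.eq_false_iff]
    intro hc
    rw [PySem.Set.contains_iff] at hc
    rw [pvCollect, mem_collect] at hc
    rcases hc with hc | ⟨i, hi, q, hq, h1, h2⟩
    · simp [PySem.Set.empty] at hc
    · rw [List.any_eq_false] at h
      exact absurd h2 (by simpa [spiritMap_keys_inj q hq p hp h1] using h i hi)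
  · rw [List.any_eq_true] at h
    obtain ⟨i, hi, h2⟩ := h
    rw [PySem.Set.contains_iff, pvCollect, mem_collect]
    exact Or.inr ⟨i, hi, p, hp, rfl, h2⟩

-- A's outer loop equals B's find? over the same list, given the membership characterisation
theorem loop_eq_find (ings : List (List (String × String))) :
    ∀ l : List (String × List String),
      (∀ p ∈ l, PySem.Set.contains (pvCollect ings) p.1 = ings.any (fun ing => pvMatch p.2 ing)) →
      pvALoop l ings =
        (match l.find? (fun p => PySem.Set.contains (pvCollect ings) p.1) with
          | some p => p.1
          | none => "non-alcoholic") := by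
  intro l
  induction l with
  | nil => intro _; rfl
  | cons p rest ih =>
    intro h
    have hp := h p (List.mem_cons_self)
    have hrest := fun q hq => h q (List.mem_cons_of_mem _ hq)
    rw [show pvALoop (p :: rest) ings
          = if pvAScan p.2 ings then p.1 else pvALoop rest ings from rfl,
        pvAScan_eq_any, ← hp, List.find?_cons]
    cases hc : PySem.Set.contains (pvCollect ings) p.1 with
    | true => rfl
    | false => exact ih hrest

-- ===== VERDICT (by name: the statement is the Claim_ definition above) =====
theorem identify_spirit_type_spec : Claim_equal_identify_spirit_type := by
  intro ings _
  unfold Spec_identify_spirit_type identify_spirit_type identify_spirit_type_alt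
  rw [loop_eq_find ings pvSpiritMap (fun p hp => contains_collect ings p hp)]
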